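-- pv_equiv track=rewrite | github.com/JamesHagerty1/LiveNotes-15-112-Spring-2020-Term-Project | Page.py | charToWord
-- ===== SOURCE A (Python) =====
-- def charToWord(row, col, page):
--     if page[row][col] == None:
--         return None
--     # determines that a word was not clicked
--     if (not page[row][col][0].isalpha()) and (page[row][col][0] != "'"):
--         return None
--     firstHalf = []
--     # go backwards from character to get the first half of the word
--     if col != 0:
--         for i in range(col, -1, -1):
--             if page[row][i] == None:
--                 break
--             if 'image' in page[row][i]:
--                 break
--             if page[row][i][0].isalpha() or page[row][i][0] == "'":
--                firstHalf.append(page[row][i][0])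
--             else:
--                 break
--         firstHalf = firstHalf[::-1]
--     # opposite process to get the other half of the word
--     secondHalf = []
--     if col != 55:
--         for j in range(col, 56):
--             if page[row][j] == None:
--                 break
--             if 'image' in page[row][j]:
--                 break
--             if page[row][j][0].isalpha() or page[row][j][0] == "'":
--                secondHalf.append(page[row][j][0])
--             else:
--                 break
--     if firstHalf != [] and secondHalf != None:
--         secondHalf = secondHalf[1:]
--     return firstHalf+secondHalf
-- ===== SOURCE B (Python) =====
-- def charToWord(row, col, page):
--     cell = page[row][col]
--     if cell == None:
--         return None
--     if (not cell[0].isalpha()) and cell[0] != "'":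
--         return None
--
--     def valid(c):
--         return c != None and 'image' not in c and (c[0].isalpha() or c[0] == "'")
--
--     # find the word's two boundary columns by scanning outward, then build it in one pass
--     i = col
--     while i >= 0 and valid(page[row][i]):
--         i -= 1
--     start = i + 1
--     j = col
--     while j <= 55 and valid(page[row][j]):
--         j += 1
--     end = j - 1
--     return [page[row][k][0] for k in range(start, end + 1)]
-- ===== Notes on version B (the rewrite author's own statement) =====
-- stated objective: simpler
-- what changed: Instead of accumulating two half-word lists (backward loop + reversal, forward loop, then trimming the duplicated clicked column), B scans outward only to find the two boundary columns and builds the word in a single pass over range(start, end+1).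
-- outside the precondition, e.g. on charToWord(0, -2, [['a', None]]): A returns ['a'], B returns []
import Mathlib
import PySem

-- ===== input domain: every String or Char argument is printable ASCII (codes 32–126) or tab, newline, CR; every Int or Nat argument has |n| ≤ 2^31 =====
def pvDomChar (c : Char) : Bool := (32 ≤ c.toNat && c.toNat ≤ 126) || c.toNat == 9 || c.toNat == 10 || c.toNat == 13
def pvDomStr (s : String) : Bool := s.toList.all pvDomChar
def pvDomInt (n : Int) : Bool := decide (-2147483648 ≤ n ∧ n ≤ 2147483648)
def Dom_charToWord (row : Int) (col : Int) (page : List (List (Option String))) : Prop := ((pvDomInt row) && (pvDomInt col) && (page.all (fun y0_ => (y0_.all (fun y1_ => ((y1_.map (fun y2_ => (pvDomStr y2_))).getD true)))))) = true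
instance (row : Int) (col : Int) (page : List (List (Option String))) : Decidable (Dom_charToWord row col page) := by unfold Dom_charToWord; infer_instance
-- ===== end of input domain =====

-- B finds the clicked word's two boundary columns by scanning outward and builds the word in
-- one pass, instead of A's two accumulated half-lists with a reversal and a trim of the
-- duplicated clicked column (objective: simpler).


-- ===== PORT A =====
-- A's two for-loops have literally identical bodies, so both are this helper applied to the
-- respective index range; 'break' is a non-recursive branch.  firstHalf[::-1] is ported as
-- .reverse (PySem.List.slice?_none_none_neg_one), secondHalf[1:] as .drop 1, and
-- 'secondHalf != None' is always true in Python (secondHalf is a list).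
def pvLoopA (L : List (Option String)) : List Int → List String → List String
  | [], acc => acc
  | i :: rest, acc =>
    match PySem.List.pyGet? L i with
    | none => acc
    | some none => acc
    | some (some s) =>
      if PySem.Str.isIn "image" s then acc
      else
        match PySem.Str.pyGet? s 0 with
        | none => acc
        | some ch =>
          if PySem.Chars.strIsalpha [ch] || ch == '\'' then
            pvLoopA L rest (acc ++ [String.ofList [ch]])
          else acc

def charToWord (row : Int) (col : Int) (page : List (List (Option String))) : Option (List String) :=
  match PySem.List.pyGet? page row with
  | none => none
  | some L =>
    match PySem.List.pyGet? L col with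
    | none => none
    | some none => none
    | some (some s) =>
      match PySem.Str.pyGet? s 0 with
      | none => none
      | some ch =>
        if !(PySem.Chars.strIsalpha [ch]) && !(ch == '\'') then none
        else
          let firstHalf := if col ≠ 0 then (pvLoopA L (PySem.List.pyRange col (-1) (-1)) []).reverse else []
          let secondHalf := if col ≠ 55 then pvLoopA L (PySem.List.pyRange col 56 1) [] else []
          let secondHalf' := if firstHalf ≠ [] then secondHalf.drop 1 else secondHalf
          some (firstHalf ++ secondHalf')

-- ===== PORT B =====
def pvValidCell (c : Option String) : Bool :=
  match c with
  | none => false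
  | some s =>
    !(PySem.Str.isIn "image" s) &&
      (match PySem.Str.pyGet? s 0 with
       | none => false
       | some ch => PySem.Chars.strIsalpha [ch] || ch == '\'')

-- while i >= 0 and valid(page[row][i]): i -= 1;  returns i + 1
def pvScanL (L : List (Option String)) (i : Int) : Int :=
  if h : 0 ≤ i ∧ pvValidCell ((PySem.List.pyGet? L i).join) = true then pvScanL L (i - 1)
  else i + 1
termination_by (i + 1).toNat
decreasing_by omega

-- while j <= 55 and valid(page[row][j]): j += 1;  returns j - 1
def pvScanR (L : List (Option String)) (j : Int) : Int :=
  if h : j ≤ 55 ∧ pvValidCell ((PySem.List.pyGet? L j).join) = true then pvScanR L (j + 1)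
  else j - 1
termination_by (56 - j).toNat
decreasing_by omega

def pvHead (c : Option String) : String :=
  match c with
  | some s =>
    match PySem.Str.pyGet? s 0 with
    | some ch => String.ofList [ch]
    | none => ""
  | none => ""

def charToWord_alt (row : Int) (col : Int) (page : List (List (Option String))) : Option (List String) :=
  match PySem.List.pyGet? page row with
  | none => none
  | some L =>
    match PySem.List.pyGet? L col with
    | none => none
    | some none => none
    | some (some s) =>
      match PySem.Str.pyGet? s 0 with
      | none => none
      | some ch =>
        if !(PySem.Chars.strIsalpha [ch]) && !(ch == '\'') then none
        else
          some ((PySem.List.pyRange (pvScanL L col) (pvScanR L col + 1) 1).map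
                  (fun k => pvHead ((PySem.List.pyGet? L k).join)))

-- ===== PRECONDITION & SPEC =====
-- Pre_ = the inputs on which the Python A returns without raising, minus two grid-domain
-- restrictions on word clicks.  Excluded raising inputs: row/col IndexError, an empty-string
-- clicked cell, a scan whose first non-word cell is "" (then cell[0] raises), and a rightward
-- word run reaching the end of a row shorter than 56 columns.  Excluded although A returns
-- there (word clicks outside the app's 56-column grid domain): a click on a word cell at
-- negative col (accidental Python wraparound) and at col > 55 (A's hardcoded right bound
-- then yields only the left half of the word).  Clicks that start no scan (None, non-letter
-- or 'image'-marked cell) are admitted at every in-range index.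
def Pre_charToWord (row : Int) (col : Int) (page : List (List (Option String))) : Prop :=
  PySem.Raise.InRange page.length row ∧
  PySem.Raise.InRange ((PySem.List.pyGet? page row).getD []).length col ∧
  (PySem.List.pyGet? ((PySem.List.pyGet? page row).getD []) col).getD none ≠ some "" ∧
  (pvValidCell ((PySem.List.pyGet? ((PySem.List.pyGet? page row).getD []) col).getD none) = true →
    (0 ≤ col ∧ col ≤ 55 ∧
     ((((PySem.List.pyGet? page row).getD []).take (col.toNat + 1)).reverse.dropWhile
        pvValidCell).head? ≠ some (some "") ∧
     ((((((PySem.List.pyGet? page row).getD []).drop col.toNat).take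
          (56 - col.toNat)).dropWhile pvValidCell).head? ≠ some (some "")) ∧
     ((((((PySem.List.pyGet? page row).getD []).drop col.toNat).take
          (56 - col.toNat)).takeWhile pvValidCell).length =
        ((((PySem.List.pyGet? page row).getD []).drop col.toNat).take
          (56 - col.toNat)).length →
       56 ≤ ((PySem.List.pyGet? page row).getD []).length)))
instance (row : Int) (col : Int) (page : List (List (Option String))) : Decidable (Pre_charToWord row col page) := by unfold Pre_charToWord; infer_instance

def pvWitness_charToWord : Int × Int × List (List (Option String)) :=
  (0, 1, [[some "h", some "i", none, some "x"]])

def Spec_charToWord (row : Int) (col : Int) (page : List (List (Option String))) (out : Option (List String)) : Prop := out = charToWord_alt row col page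
instance (row : Int) (col : Int) (page : List (List (Option String))) (out : Option (List String)) : Decidable (Spec_charToWord row col page out) := by unfold Spec_charToWord; infer_instance

-- ===== CLAIM (what is proved, stated in full; the proofs are below) =====
def Claim_equal_charToWord : Prop := ∀ (row : Int) (col : Int) (page : List (List (Option String))), Dom_charToWord row col page → Pre_charToWord row col page → Spec_charToWord row col page (charToWord row col page)

-- ===== LEMMAS AND PROOFS =====

theorem pvWitness_ok :
    Dom_charToWord pvWitness_charToWord.1 pvWitness_charToWord.2.1 pvWitness_charToWord.2.2 ∧
    Pre_charToWord pvWitness_charToWord.1 pvWitness_charToWord.2.1 pvWitness_charToWord.2.2 := by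
  decide

-- A's loop body takes exactly the step pvValidCell decides, appending pvHead of the cell
theorem pvLoopA_eq (L : List (Option String)) (idx : List Int) (acc : List String) :
    pvLoopA L idx acc =
      acc ++ (idx.takeWhile (fun i => pvValidCell ((PySem.List.pyGet? L i).join))).map
               (fun i => pvHead ((PySem.List.pyGet? L i).join)) := by
  induction idx generalizing acc with
  | nil => simp [pvLoopA]
  | cons i rest ih =>
    cases hc : PySem.List.pyGet? L i with
    | none => simp [pvLoopA, hc, pvValidCell]
    | some c =>
      cases c with
      | none => simp [pvLoopA, hc, pvValidCell]
      | some s =>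
        by_cases him : PySem.Str.isIn "image" s = true
        · simp only [pvLoopA, hc, him, if_true]
          simp only [List.takeWhile_cons, pvValidCell, Option.join]
          simp at him
          simp [hc, him]
        · cases hch : PySem.Str.pyGet? s 0 with
          | none =>
            simp only [pvLoopA, hc, him, if_false, Bool.false_eq_true, hch]
            simp only [List.takeWhile_cons, pvValidCell, Option.join]
            simp at him hch
            simp [hc, him, hch]
          | some ch =>
            by_cases hal : (PySem.Chars.strIsalpha [ch] || ch == '\'') = true
            · simp only [pvLoopA, hc, him, Bool.false_eq_true, if_false, hch, hal, if_true, ih]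
              simp only [List.takeWhile_cons, pvValidCell, Option.join]
              simp at him hch hal
              simp [hc, him, hch, hal, pvHead]
            · simp only [pvLoopA, hc, him, Bool.false_eq_true, if_false, hch, hal]
              simp only [List.takeWhile_cons, pvValidCell, Option.join]
              simp at him hch
              simp [hc, him, hch, hal]

theorem pvScanL_eq (L : List (Option String)) (i : Int) (hi : -1 ≤ i) :
    pvScanL L i =
      i + 1 - ((PySem.List.pyRange i (-1) (-1)).takeWhile
                 (fun k => pvValidCell ((PySem.List.pyGet? L k).join))).length := by
  by_cases h0 : 0 ≤ i
  · by_cases hv : pvValidCell ((PySem.List.pyGet? L i).join) = true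
    · rw [pvScanL, dif_pos ⟨h0, hv⟩, pvScanL_eq L (i-1) (by omega),
        PySem.List.pyRange_neg_one_cons (by omega : (-1:Int) < i), List.takeWhile_cons, hv]
      simp

    · rw [pvScanL, dif_neg (by simp [hv]),
        PySem.List.pyRange_neg_one_cons (by omega : (-1:Int) < i), List.takeWhile_cons]
      simp [hv]
  · rw [pvScanL, dif_neg (by simp [h0]), PySem.List.pyRange_neg_one_eq_nil (by omega)]
    simp
termination_by (i + 1).toNat
decreasing_by omega

theorem pvScanR_eq (L : List (Option String)) (j : Int) (hj : j ≤ 56) :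
    pvScanR L j =
      j - 1 + ((PySem.List.pyRange j 56 1).takeWhile
                 (fun k => pvValidCell ((PySem.List.pyGet? L k).join))).length := by
  by_cases h0 : j ≤ 55
  · by_cases hv : pvValidCell ((PySem.List.pyGet? L j).join) = true
    · rw [pvScanR, dif_pos ⟨h0, hv⟩, pvScanR_eq L (j+1) (by omega),
        PySem.List.pyRange_one_cons (by omega : j < 56), List.takeWhile_cons, hv]
      simp

    · rw [pvScanR, dif_neg (by simp [hv]),
        PySem.List.pyRange_one_cons (by omega : j < 56), List.takeWhile_cons]
      simp [hv]
  · rw [pvScanR, dif_neg (by simp; omega), PySem.List.pyRange_one_eq_nil (by omega)]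
    simp
termination_by (56 - j).toNat
decreasing_by omega

-- the backward run, reversed, is the ascending range of its indices
theorem pvTakeWhile_down (p : Int → Bool) (i : Int) (hi : -1 ≤ i) :
    ((PySem.List.pyRange i (-1) (-1)).takeWhile p).reverse =
      PySem.List.pyRange
        (i + 1 - ((PySem.List.pyRange i (-1) (-1)).takeWhile p).length) (i + 1) 1 := by
  by_cases h0 : 0 ≤ i
  · rw [PySem.List.pyRange_neg_one_cons (by omega : (-1:Int) < i), List.takeWhile_cons]
    by_cases hv : p i = true
    · have ih := pvTakeWhile_down p (i-1) (by omega)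
      simp only [hv, if_true, List.reverse_cons, List.length_cons, ih]
      set t := (PySem.List.pyRange (i-1) (-1) (-1)).takeWhile p with ht
      push_cast
      rw [show i - 1 + 1 = i by omega,
        show i + 1 - ((t.length : Int) + 1) = i - (t.length : Int) by omega,
        PySem.List.pyRange_one_succ_right (show i - (t.length : Int) ≤ i by omega)]
    · simp only [hv, Bool.false_eq_true, if_false, List.reverse_nil, List.length_nil]
      rw [PySem.List.pyRange_one_eq_nil (by omega)]
  · rw [PySem.List.pyRange_neg_one_eq_nil (by omega)]
    simp only [List.takeWhile_nil, List.reverse_nil, List.length_nil]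
    rw [PySem.List.pyRange_one_eq_nil (by omega)]
termination_by (i + 1).toNat
decreasing_by omega

-- the forward run is the ascending range of its indices
theorem pvTakeWhile_up (p : Int → Bool) (j b : Int) :
    (PySem.List.pyRange j b 1).takeWhile p =
      PySem.List.pyRange j (j + ((PySem.List.pyRange j b 1).takeWhile p).length) 1 := by
  by_cases hb : j < b
  · rw [PySem.List.pyRange_one_cons hb, List.takeWhile_cons]
    by_cases hv : p j = true
    · have ih := pvTakeWhile_up p (j+1) b
      set t := (PySem.List.pyRange (j+1) b 1).takeWhile p with ht
      set n := t.length with hn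
      simp only [hv, if_true, List.length_cons]
      push_cast
      rw [ih, PySem.List.length_pyRange_one,
        PySem.List.pyRange_one_cons (by omega : j < j + ((((j + 1 + (n:Int) - (j + 1)).toNat : Int)) + 1))]
      congr 2
      omega
    · simp only [hv, Bool.false_eq_true, if_false, List.length_nil]
      rw [PySem.List.pyRange_one_eq_nil (by omega)]
  · rw [PySem.List.pyRange_one_eq_nil (by omega)]
    simp only [List.takeWhile_nil, List.length_nil]
    rw [PySem.List.pyRange_one_eq_nil (by omega)]
termination_by (b - j).toNat
decreasing_by omega

-- assembling A's two halves equals B's single range build, for any cell test p and head map hh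

theorem pvAssemble (p : Int → Bool) (hh : Int → String) (col : Int)
    (h0 : 0 ≤ col) (h55 : col ≤ 55) :
    (if col ≠ 0 then (((PySem.List.pyRange col (-1) (-1)).takeWhile p).map hh).reverse else []) ++
      (if (if col ≠ 0 then (((PySem.List.pyRange col (-1) (-1)).takeWhile p).map hh).reverse else []) ≠ [] then
        (if col ≠ 55 then ((PySem.List.pyRange col 56 1).takeWhile p).map hh else []).drop 1
      else (if col ≠ 55 then ((PySem.List.pyRange col 56 1).takeWhile p).map hh else [])) =
    (PySem.List.pyRange
        (col + 1 - ((PySem.List.pyRange col (-1) (-1)).takeWhile p).length)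
        ((col - 1 + ((PySem.List.pyRange col 56 1).takeWhile p).length) + 1) 1).map hh := by
  have hdc : PySem.List.pyRange col (-1) (-1) = col :: PySem.List.pyRange (col-1) (-1) (-1) :=
    PySem.List.pyRange_neg_one_cons (by omega)
  have huc : PySem.List.pyRange col 56 1 = col :: PySem.List.pyRange (col+1) 56 1 :=
    PySem.List.pyRange_one_cons (by omega)
  by_cases hp : p col = true
  · have ht1 : (PySem.List.pyRange col (-1) (-1)).takeWhile p =
        col :: (PySem.List.pyRange (col-1) (-1) (-1)).takeWhile p := by
      rw [hdc, List.takeWhile_cons, hp]; simp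
    have ht2 : (PySem.List.pyRange col 56 1).takeWhile p =
        col :: (PySem.List.pyRange (col+1) 56 1).takeWhile p := by
      rw [huc, List.takeWhile_cons, hp]; simp
    by_cases hc0 : col = 0
    · subst hc0
      rw [if_neg (show ¬((0:Int) ≠ 0) by norm_num)]
      rw [if_neg (show ¬(([] : List String) ≠ []) by simp)]
      rw [if_pos (show (0:Int) ≠ 55 by norm_num), List.nil_append]
      have ha1 : ((PySem.List.pyRange 0 (-1) (-1)).takeWhile p).length = 1 := by
        rw [ht1, show (0:Int) - 1 = -1 by norm_num,
          PySem.List.pyRange_neg_one_eq_nil (by omega)]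
        simp
      rw [ha1]
      norm_num
      conv_lhs => rw [pvTakeWhile_up p 0 56]
      norm_num
    · by_cases hc55 : col = 55
      · subst hc55
        rw [if_pos (show (55:Int) ≠ 0 by norm_num)]
        rw [if_pos (show (((PySem.List.pyRange 55 (-1) (-1)).takeWhile p).map hh).reverse ≠ []
              by rw [ht1]; simp)]
        rw [if_neg (show ¬((55:Int) ≠ 55) by norm_num)]
        have hb1 : ((PySem.List.pyRange 55 56 1).takeWhile p).length = 1 := by
          rw [ht2, PySem.List.pyRange_one_eq_nil (by omega)]; simp
        rw [hb1, List.drop_nil, List.append_nil, ← List.map_reverse,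
          pvTakeWhile_down p 55 (by omega)]
        norm_num
      · rw [if_pos hc0, if_pos hc55]
        rw [if_pos (show (((PySem.List.pyRange col (-1) (-1)).takeWhile p).map hh).reverse ≠ []
              by rw [ht1]; simp)]
        have hb1 : 1 ≤ ((PySem.List.pyRange col 56 1).takeWhile p).length := by
          rw [ht2]; simp
        rw [← List.map_reverse, pvTakeWhile_down p col (by omega)]
        conv_lhs => rw [pvTakeWhile_up p col 56,
          PySem.List.pyRange_one_cons (show col < col + (((PySem.List.pyRange col 56 1).takeWhile p).length : Int) by push_cast; omega)]
        rw [List.map_cons, List.drop_one, List.tail_cons, ← List.map_append,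
          ← PySem.List.pyRange_one_append _ (col+1) _ (by omega) (by omega)]
        congr 2
        omega
  · have ht1 : (PySem.List.pyRange col (-1) (-1)).takeWhile p = [] := by
      rw [hdc, List.takeWhile_cons]; simp [hp]
    have ht2 : (PySem.List.pyRange col 56 1).takeWhile p = [] := by
      rw [huc, List.takeWhile_cons]; simp [hp]
    rw [ht1, ht2]
    simp

theorem pvMain (row col : Int) (page : List (List (Option String)))
    (h0 : 0 ≤ col) (h55 : col ≤ 55) :
    charToWord row col page = charToWord_alt row col page := by
  unfold charToWord charToWord_alt
  cases hpg : PySem.List.pyGet? page row with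
  | none => rfl
  | some L =>
    dsimp only
    cases hc : PySem.List.pyGet? L col with
    | none => rfl
    | some c =>
      cases c with
      | none => rfl
      | some s =>
        dsimp only
        cases hch : PySem.Str.pyGet? s 0 with
        | none => rfl
        | some ch =>
          dsimp only
          by_cases hg : (!(PySem.Chars.strIsalpha [ch]) && !(ch == '\'')) = true
          · simp only [hg, if_true]
          · simp only [hg, Bool.false_eq_true, if_false]
            rw [pvScanL_eq L col (by omega), pvScanR_eq L col (by omega)]
            simp only [pvLoopA_eq, List.nil_append]
            exact congrArg some (pvAssemble _ _ col h0 h55)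

-- a click on a cell that starts no word scan gives the same result in both programs, at any index
theorem pvMainInvalid (row col : Int) (page : List (List (Option String)))
    (hv : pvValidCell
      ((PySem.List.pyGet? ((PySem.List.pyGet? page row).getD []) col).getD none) = false) :
    charToWord row col page = charToWord_alt row col page := by
  unfold charToWord charToWord_alt
  cases hpg : PySem.List.pyGet? page row with
  | none => rfl
  | some L =>
    rw [hpg] at hv
    simp only [Option.getD_some] at hv
    dsimp only
    cases hc : PySem.List.pyGet? L col with
    | none => rfl
    | some c =>
      rw [hc] at hv
      simp only [Option.getD_some] at hv
      cases c with
      | none => rfl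
      | some s =>
        dsimp only
        cases hch : PySem.Str.pyGet? s 0 with
        | none => rfl
        | some ch =>
          dsimp only
          by_cases hg : (!(PySem.Chars.strIsalpha [ch]) && !(ch == '\'')) = true
          · simp only [hg, if_true]
          · simp only [hg, Bool.false_eq_true, if_false]
            have hP : pvValidCell ((PySem.List.pyGet? L col).join) = false := by
              rw [hc]; exact hv
            have hA1 : (PySem.List.pyRange col (-1) (-1)).takeWhile
                (fun k => pvValidCell ((PySem.List.pyGet? L k).join)) = [] := by
              by_cases h0 : 0 ≤ col
              · rw [PySem.List.pyRange_neg_one_cons (by omega), List.takeWhile_cons]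
                simp [hP]
              · rw [PySem.List.pyRange_neg_one_eq_nil (by omega)]
                simp
            have hA2 : (PySem.List.pyRange col 56 1).takeWhile
                (fun k => pvValidCell ((PySem.List.pyGet? L k).join)) = [] := by
              by_cases h55 : col < 56
              · rw [PySem.List.pyRange_one_cons h55, List.takeWhile_cons]
                simp [hP]
              · rw [PySem.List.pyRange_one_eq_nil (by omega)]
                simp
            have hL : pvScanL L col = col + 1 := by
              rw [pvScanL, dif_neg]
              rintro ⟨-, h2⟩
              rw [hP] at h2
              exact absurd h2 (by simp)
            have hR : pvScanR L col = col - 1 := by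
              rw [pvScanR, dif_neg]
              rintro ⟨-, h2⟩
              rw [hP] at h2
              exact absurd h2 (by simp)
            rw [hL, hR,
              PySem.List.pyRange_one_eq_nil (show (col:Int) - 1 + 1 ≤ col + 1 by omega)]
            simp only [pvLoopA_eq, hA1, hA2, List.map_nil, List.nil_append]
            simp

-- ===== VERDICT (by name: the statement is the Claim_ definition above) =====
theorem charToWord_spec : Claim_equal_charToWord := by
  intro row col page _ hpre
  unfold Spec_charToWord
  by_cases hv : pvValidCell
      ((PySem.List.pyGet? ((PySem.List.pyGet? page row).getD []) col).getD none) = true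
  · obtain ⟨h0, h55, -⟩ := hpre.2.2.2 hv
    exact pvMain row col page h0 h55
  · exact pvMainInvalid row col page (by simpa using hv)
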